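-- pv_equiv track=rewrite | github.com/bootphon/wordseg | wordseg/algos/tp.py | _threshold_relative
-- ===== SOURCE A (Python) =====
-- def _threshold_relative(units, tps):
--     """Relative threshold segmentation method"""
--     prelast = units[0]
--     last = units[1]
--     unit = units[2]
--
--     cword = [prelast, last]
--     cwords = [cword]  # initialisation
--     for _next in units[3:]:
--         # relative threshold condition
--         cond = (tps[prelast, last] > tps[last, unit]
--                 and tps[last, unit] < tps[unit, _next])
--
--         if cond or last == 'UB' or unit == 'UB':
--             cword = []
--             cwords.append(cword)
--
--         cword.append(unit)
--         prelast = last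
--         last = unit
--         unit = _next
--
--     cwords[-1].append(unit)
--     return cwords
-- ===== SOURCE B (Python) =====
-- def _threshold_relative(units, tps):
--     """Relative threshold segmentation: mark boundary indices first, then split."""
--     n = len(units)
--     # the method is only defined for three or more units (same requirement as the
--     # sliding-window formulation, which unpacks the first three units up front)
--     u0, u1, _ = units[0], units[1], units[2]
--     boundaries = {i for i in range(2, n - 1)
--                   if (tps[units[i - 2], units[i - 1]] > tps[units[i - 1], units[i]]
--                       and tps[units[i - 1], units[i]] < tps[units[i], units[i + 1]])
--                   or units[i - 1] == 'UB' or units[i] == 'UB'}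
--     words = [[u0, u1]]
--     for i in range(2, n):
--         if i in boundaries:
--             words.append([])
--         words[-1].append(units[i])
--     return words
-- ===== Notes on version B (the rewrite author's own statement) =====
-- stated objective: alternative
-- what changed: Replaces A's single fold with a mutating three-unit sliding window by two index-based passes: first a set of boundary indices is computed, then the unit list is split at those indices.
import Mathlib
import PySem

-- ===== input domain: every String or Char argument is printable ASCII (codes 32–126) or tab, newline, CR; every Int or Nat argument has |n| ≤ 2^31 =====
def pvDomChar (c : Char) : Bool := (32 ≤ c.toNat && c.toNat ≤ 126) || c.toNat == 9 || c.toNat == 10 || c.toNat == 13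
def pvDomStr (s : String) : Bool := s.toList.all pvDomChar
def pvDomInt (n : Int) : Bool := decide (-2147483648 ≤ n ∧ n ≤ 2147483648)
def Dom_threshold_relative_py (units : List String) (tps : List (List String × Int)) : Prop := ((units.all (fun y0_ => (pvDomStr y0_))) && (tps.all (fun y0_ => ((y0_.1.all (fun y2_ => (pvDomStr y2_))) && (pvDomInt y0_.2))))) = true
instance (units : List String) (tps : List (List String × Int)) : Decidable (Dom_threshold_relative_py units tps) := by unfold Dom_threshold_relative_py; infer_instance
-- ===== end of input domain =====

-- B differs from A in decomposition only (two index-based passes instead of one sliding-window fold);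
-- A raises on len(units) < 3 and on missing tps keys — those inputs are excluded by Pre_.

-- tps[a, b] — total form of the dict subscript; inside Pre_ every key A (and B) looks up is present
def tpLook (tps : List (List String × Int)) (a b : String) : Int :=
  ((PySem.Dict.mk tps).get? [a, b]).getD 0

-- xs[-1].append(x) on a nonempty list of lists
def appendLast (ws : List (List String)) (x : String) : List (List String) :=
  match ws with
  | [] => []
  | [w] => [w ++ [x]]
  | w :: ws => w :: appendLast ws x

-- ===== PORT A =====
-- one loop iteration of A: state (prelast, last, unit, cwords)
def pvA_step (tps : List (List String × Int))
    (st : String × String × String × List (List String)) (nxt : String) :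
    String × String × String × List (List String) :=
  let (prelast, last, unit, cwords) := st
  let cwords :=
    if (tpLook tps prelast last > tpLook tps last unit ∧
        tpLook tps last unit < tpLook tps unit nxt) ∨ last = "UB" ∨ unit = "UB"
    then cwords ++ [[]] else cwords
  (last, unit, nxt, appendLast cwords unit)

def threshold_relative_py (units : List String) (tps : List (List String × Int)) : List (List String) :=
  match units with
  | u0 :: u1 :: u2 :: rest =>
      let st := rest.foldl (pvA_step tps) (u0, u1, u2, [[u0, u1]])
      appendLast st.2.2.2 st.2.2.1
  | _ => []   -- Python raises IndexError here; excluded by Pre_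

-- ===== PORT B =====
-- B's boundary condition at index i (indices are in range on every admitted input)
def pvB_cond (units : List String) (tps : List (List String × Int)) (i : Nat) : Bool :=
  decide ((tpLook tps (units.getD (i-2) "") (units.getD (i-1) "") >
             tpLook tps (units.getD (i-1) "") (units.getD i "") ∧
           tpLook tps (units.getD (i-1) "") (units.getD i "") <
             tpLook tps (units.getD i "") (units.getD (i+1) "")) ∨
          units.getD (i-1) "" = "UB" ∨ units.getD i "" = "UB")

def threshold_relative_py_alt (units : List String) (tps : List (List String × Int)) : List (List String) :=
  let n := units.length
  let boundaries := PySem.Set.ofList ((List.range' 2 (n - 3)).filter (pvB_cond units tps))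
  (List.range' 2 (n - 2)).foldl
    (fun ws i =>
      let ws := if boundaries.contains i then ws ++ [[]] else ws
      appendLast ws (units.getD i ""))
    [[units.getD 0 "", units.getD 1 ""]]

-- ===== PRECONDITION & SPEC =====
-- Pre_: exactly where the Python A returns: at least three units, and every tps key A's loop
-- actually subscripts is present (the third lookup of each step is short-circuited by 'and').
def Pre_threshold_relative_py (units : List String) (tps : List (List String × Int)) : Prop :=
  3 ≤ units.length ∧
  ∀ i, i < units.length - 1 → 2 ≤ i →
    ((PySem.Dict.mk tps).get? [units.getD (i-2) "", units.getD (i-1) ""]).isSome ∧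
    ((PySem.Dict.mk tps).get? [units.getD (i-1) "", units.getD i ""]).isSome ∧
    (tpLook tps (units.getD (i-2) "") (units.getD (i-1) "") >
       tpLook tps (units.getD (i-1) "") (units.getD i "") →
     ((PySem.Dict.mk tps).get? [units.getD i "", units.getD (i+1) ""]).isSome)
instance (units : List String) (tps : List (List String × Int)) : Decidable (Pre_threshold_relative_py units tps) := by unfold Pre_threshold_relative_py; infer_instance

def pvWitness_threshold_relative_py : List String × (List (List String × Int)) :=
  (["a", "b", "c", "a"], [(["a", "b"], 1), (["b", "c"], 0), (["c", "a"], 2)])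

def Spec_threshold_relative_py (units : List String) (tps : List (List String × Int)) (out : List (List String)) : Prop := out = threshold_relative_py_alt units tps
instance (units : List String) (tps : List (List String × Int)) (out : List (List String)) : Decidable (Spec_threshold_relative_py units tps out) := by unfold Spec_threshold_relative_py; infer_instance

-- ===== CLAIM (what is proved, stated in full; the proofs are below) =====
def Claim_equal_threshold_relative_py : Prop := ∀ (units : List String) (tps : List (List String × Int)), Dom_threshold_relative_py units tps → Pre_threshold_relative_py units tps → Spec_threshold_relative_py units tps (threshold_relative_py units tps)
-- ===== LEMMAS AND PROOFS =====

-- membership in B's boundary set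
lemma mem_boundaries (units : List String) (tps : List (List String × Int)) (i : Nat) :
    (PySem.Set.ofList ((List.range' 2 (units.length - 3)).filter (pvB_cond units tps))).contains i =
      (decide (2 ≤ i ∧ i < units.length - 1) && pvB_cond units tps i) := by
  rw [Bool.eq_iff_iff]
  simp [pysem, List.mem_filter, List.mem_range'_1]
  intro _ h2
  omega

-- l[n] = t when drop n l = t :: ts
lemma getD_of_drop (l : List String) (n : Nat) (t : String) (ts : List String)
    (h : l.drop n = t :: ts) : l.getD n "" = t := by
  have h0 : l[n]? = some t := by
    have := (List.getElem?_drop (xs := l) (i := n) (j := 0)).symm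
    simp [h] at this; simpa using this
  simp [List.getD_eq_getElem?_getD, h0]

lemma drop_succ_of_drop (l : List String) (n : Nat) (t : String) (ts : List String)
    (h : l.drop n = t :: ts) : l.drop (n+1) = ts := by
  have := (List.tail_drop (l := l) (i := n)).symm
  rw [h] at this; simpa using this

-- the main correspondence: A's fold from window position j equals B's index loop from j
lemma loop_eq (tps : List (List String × Int)) (units : List String) :
    ∀ (tail : List String) (j : Nat) (acc : List (List String)),
      2 ≤ j → j < units.length → units.drop (j+1) = tail →
      (let st := tail.foldl (pvA_step tps)
          (units.getD (j-2) "", units.getD (j-1) "", units.getD j "", acc)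
       appendLast st.2.2.2 st.2.2.1)
      = (List.range' j (units.length - j)).foldl
          (fun ws i =>
            let ws := if (PySem.Set.ofList ((List.range' 2 (units.length - 3)).filter
                            (pvB_cond units tps))).contains i then ws ++ [[]] else ws
            appendLast ws (units.getD i ""))
          acc := by
  intro tail
  induction tail with
  | nil =>
    intro j acc hj2 hjl hdrop
    have hL : units.length = j + 1 := by
      have := List.drop_eq_nil_iff.mp hdrop
      omega
    have hone : units.length - j = 1 := by omega
    simp [hone]
    rw [if_neg]
    rintro ⟨⟨_, h2⟩, _⟩
    omega
  | cons t ts ih =>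
    intro j acc hj2 hjl hdrop
    have ht : units.getD (j+1) "" = t := getD_of_drop _ _ _ _ hdrop
    have hts : units.drop (j+2) = ts := drop_succ_of_drop _ _ _ _ hdrop
    have hj1 : j + 1 < units.length := by
      by_contra h
      rw [List.drop_eq_nil_of_le (by omega)] at hdrop
      simp at hdrop
    have hcnt : units.length - j = (units.length - (j+1)) + 1 := by omega
    have hbj : (decide (2 ≤ j ∧ j < units.length - 1)) = true := by
      simp; omega
    rw [hcnt, List.range'_succ]
    have hIH := ih (j+1)
      (appendLast (if ((tpLook tps (units.getD (j-2) "") (units.getD (j-1) "") >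
              tpLook tps (units.getD (j-1) "") (units.getD j "") ∧
            tpLook tps (units.getD (j-1) "") (units.getD j "") <
              tpLook tps (units.getD j "") (units.getD (j+1) "")) ∨
           units.getD (j-1) "" = "UB" ∨ units.getD j "" = "UB")
         then acc ++ [[]] else acc) (units.getD j ""))
      (by omega) hj1 hts
    simp only [show j + 1 - 2 = j - 1 from by omega, show j + 1 - 1 = j from by omega] at hIH
    simp only [List.foldl_cons, pvA_step, mem_boundaries, hbj, Bool.true_and, ← ht]
    simp only [mem_boundaries] at hIH
    simp only [pvB_cond, decide_eq_true_eq]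
    simp only [pvB_cond] at hIH
    exact hIH

-- ===== VERDICT (by name: the statement is the Claim_ definition above) =====
theorem threshold_relative_py_spec : Claim_equal_threshold_relative_py := by
  intro units tps _ hpre
  unfold Spec_threshold_relative_py
  obtain ⟨h3, -⟩ := hpre
  rcases units with _ | ⟨u0, _ | ⟨u1, _ | ⟨u2, rest⟩⟩⟩ <;> try simp at h3
  have hl := loop_eq tps (u0 :: u1 :: u2 :: rest) rest 2 [[u0, u1]]
    (by omega) (by simp) (by simp)
  simpa [threshold_relative_py, threshold_relative_py_alt] using hl
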